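-- pv_equiv track=rewrite | github.com/hmchan/eye4-rtsp-proxy | eye4_rtsp_proxy.py | decode_init_string
-- ===== SOURCE A (Python) =====
-- from typing import Optional
--
-- INIT_STRING_LUT = bytes([
--     0x49, 0x59, 0x43, 0x3D, 0xB5, 0xBF, 0x6D, 0xA3,
--     0x47, 0x53, 0x4F, 0x61, 0x65, 0xE3, 0x71, 0xE9,
--     0x67, 0x7F, 0x02, 0x03, 0x0B, 0xAD, 0xB3, 0x89,
--     0x2B, 0x2F, 0x35, 0xC1, 0x6B, 0x8B, 0x95, 0x97,
--     0x11, 0xE5, 0xA7, 0x0D, 0xEF, 0xF1, 0x05, 0x07,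
--     0x83, 0xFB, 0x9D, 0x3B, 0xC5, 0xC7, 0x13, 0x17,
--     0x1D, 0x1F, 0x25, 0x29, 0xD3, 0xDF,
-- ])
--
-- def decode_init_string(init_str: str) -> tuple[str, Optional[str]]:
--     """Decode a CS2 PPCS init string. Returns (servers, PSK or None)."""
--     parts = init_str.split(":", 1)
--     encoded = parts[0]
--     psk = parts[1] if len(parts) > 1 else None
--
--     n = len(encoded) // 2
--     output = bytearray(n)
--     for i in range(n):
--         running_xor = 0x39
--         for j in range(i):
--             running_xor ^= output[j]
--         hi = ord(encoded[2 * i]) - ord("A")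
--         lo = ord(encoded[2 * i + 1]) - ord("A")
--         byte_val = (hi << 4) | lo
--         output[i] = (running_xor ^ INIT_STRING_LUT[i % len(INIT_STRING_LUT)] ^ byte_val) & 0xFF
--
--     return output.decode("ascii", errors="replace"), psk
-- ===== SOURCE B (Python) =====
-- from typing import Optional
--
-- INIT_STRING_LUT = bytes([
--     0x49, 0x59, 0x43, 0x3D, 0xB5, 0xBF, 0x6D, 0xA3,
--     0x47, 0x53, 0x4F, 0x61, 0x65, 0xE3, 0x71, 0xE9,
--     0x67, 0x7F, 0x02, 0x03, 0x0B, 0xAD, 0xB3, 0x89,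
--     0x2B, 0x2F, 0x35, 0xC1, 0x6B, 0x8B, 0x95, 0x97,
--     0x11, 0xE5, 0xA7, 0x0D, 0xEF, 0xF1, 0x05, 0x07,
--     0x83, 0xFB, 0x9D, 0x3B, 0xC5, 0xC7, 0x13, 0x17,
--     0x1D, 0x1F, 0x25, 0x29, 0xD3, 0xDF,
-- ])
--
-- def decode_init_string(init_str: str) -> tuple[str, Optional[str]]:
--     """Decode a CS2 PPCS init string. Returns (servers, PSK or None).
--
--     Single pass over the letter pairs with one carried term: the running
--     XOR of previous output bytes telescopes, so each output byte is just
--     (previous term ^ current term) & 0xFF where the term of pair i is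
--     LUT[i % len] ^ decoded_pair_i (and the seed term is 0x39).
--     """
--     parts = init_str.split(":", 1)
--     encoded = parts[0]
--     psk = parts[1] if len(parts) > 1 else None
--
--     out = bytearray()
--     prev = 0x39
--     it = iter(encoded)
--     for i, (c1, c2) in enumerate(zip(it, it)):
--         cur = INIT_STRING_LUT[i % len(INIT_STRING_LUT)] ^ (
--             ((ord(c1) - 65) << 4) | (ord(c2) - 65))
--         out.append((prev ^ cur) & 0xFF)
--         prev = cur
--     return out.decode("ascii", errors="replace"), psk
-- ===== Notes on version B (the rewrite author's own statement) =====
-- stated objective: faster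
-- what changed: A recomputes the running XOR of all previous output bytes from scratch at every position (quadratic); B is a single state-machine pass over the letter pairs that carries only the previous pair's LUT^value term, since the prefix XOR telescopes, emitting each byte in O(1).
import Mathlib
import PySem

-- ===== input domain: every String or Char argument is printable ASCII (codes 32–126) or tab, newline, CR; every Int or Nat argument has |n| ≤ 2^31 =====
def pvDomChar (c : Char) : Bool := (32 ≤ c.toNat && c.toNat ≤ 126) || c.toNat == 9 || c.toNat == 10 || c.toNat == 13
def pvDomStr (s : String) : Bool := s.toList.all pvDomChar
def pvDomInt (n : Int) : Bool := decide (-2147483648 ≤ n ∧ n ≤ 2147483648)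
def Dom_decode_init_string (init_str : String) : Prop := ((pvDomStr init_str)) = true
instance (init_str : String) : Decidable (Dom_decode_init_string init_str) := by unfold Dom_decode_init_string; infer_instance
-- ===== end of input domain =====

-- B replaces A's quadratic rescan of all previous output bytes by a single
-- state-machine pass over the letter pairs carrying one XOR term, O(n) vs O(n^2).

-- module constant INIT_STRING_LUT (shared by both Pythons)
def pvLUT : List Int := [
  0x49, 0x59, 0x43, 0x3D, 0xB5, 0xBF, 0x6D, 0xA3,
  0x47, 0x53, 0x4F, 0x61, 0x65, 0xE3, 0x71, 0xE9,
  0x67, 0x7F, 0x02, 0x03, 0x0B, 0xAD, 0xB3, 0x89,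
  0x2B, 0x2F, 0x35, 0xC1, 0x6B, 0x8B, 0x95, 0x97,
  0x11, 0xE5, 0xA7, 0x0D, 0xEF, 0xF1, 0x05, 0x07,
  0x83, 0xFB, 0x9D, 0x3B, 0xC5, 0xC7, 0x13, 0x17,
  0x1D, 0x1F, 0x25, 0x29, 0xD3, 0xDF]

-- bytes.decode("ascii", errors="replace"): byte < 128 is itself, otherwise U+FFFD
def pvByteToChar (v : Int) : Char := if v < 128 then Char.ofNat v.toNat else '\uFFFD'

-- ===== PORT A =====
def decode_init_string (init_str : String) : String × Option String :=
  let parts := (PySem.Str.splitMax? init_str ":" 1).getD []   -- sep ≠ "" so never none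
  let encoded := parts.getD 0 ""
  let psk : Option String := if parts.length > 1 then some (parts.getD 1 "") else none
  let enc := encoded.toList
  let n := enc.length / 2
  let output : List Int := (List.range n).foldl (fun out i =>
      -- running_xor = 0x39; for j in range(i): running_xor ^= output[j]
      -- (out holds exactly the i bytes written so far)
      let running_xor := out.foldl (fun a x => PySem.Int.bxor a x) 0x39
      let hi : Int := ((enc.getD (2 * i) 'A').toNat : Int) - 65   -- index 2*i < enc.length: always in range
      let lo : Int := ((enc.getD (2 * i + 1) 'A').toNat : Int) - 65
      let byte_val := PySem.Int.bor (hi * 16) lo                  -- hi << 4 = hi * 16, exact for every Python int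
      out ++ [PySem.Int.band (PySem.Int.bxor (PySem.Int.bxor running_xor (pvLUT.getD (i % 54) 0)) byte_val) 255]
    ) []
  (String.ofList (output.map pvByteToChar), psk)

-- ===== PORT B =====
-- Source B's 'for i, (c1, c2) in enumerate(zip(it, it))' loop: structural recursion
-- consuming the characters two at a time, carrying the pair index i and the
-- previous term 'prev'; a trailing odd character is dropped, as zip does.
def pvPairLoop (cs : List Char) (i : Nat) (prev : Int) : List Int :=
  match cs with
  | c1 :: c2 :: rest =>
      let cur := PySem.Int.bxor (pvLUT.getD (i % 54) 0)
        (PySem.Int.bor ((((c1.toNat : Int) - 65) * 16)) (((c2.toNat : Int) - 65)))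
      PySem.Int.band (PySem.Int.bxor prev cur) 255 :: pvPairLoop rest (i + 1) cur
  | _ => []

def decode_init_string_alt (init_str : String) : String × Option String :=
  let parts := (PySem.Str.splitMax? init_str ":" 1).getD []   -- sep ≠ "" so never none
  let encoded := parts.getD 0 ""
  let psk : Option String := if parts.length > 1 then some (parts.getD 1 "") else none
  let out := pvPairLoop encoded.toList 0 0x39
  (String.ofList (out.map pvByteToChar), psk)

-- ===== PRECONDITION & SPEC =====
def Spec_decode_init_string (init_str : String) (out : String × Option String) : Prop := out = decode_init_string_alt init_str
instance (init_str : String) (out : String × Option String) : Decidable (Spec_decode_init_string init_str out) := by unfold Spec_decode_init_string; infer_instance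

-- ===== CLAIM (what is proved, stated in full; the proofs are below) =====
def Claim_equal_decode_init_string : Prop := ∀ (init_str : String), Dom_decode_init_string init_str → Spec_decode_init_string init_str (decode_init_string init_str)

-- ===== LEMMAS AND PROOFS =====

-- low 8 bits of an Int, as a Nat
def pvN (a : Int) : Nat := (a % 256).toNat

theorem pvN_lt (a : Int) : pvN a < 256 := by
  unfold pvN; omega

theorem band255_eq (a : Int) : PySem.Int.band a 255 = ((pvN a : Nat) : Int) := by
  unfold pvN
  rw [PySem.Int.band.eq_1]
  have h255 : (255 : Int).toNat = 255 := rfl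
  by_cases h : 0 ≤ a
  · rw [if_pos h, if_pos (by norm_num : (0:Int) ≤ 255), h255]
    have h1 : a.toNat &&& 255 = a.toNat % 256 := Nat.and_two_pow_sub_one_eq_mod a.toNat 8
    omega
  · rw [if_neg h, if_pos (by norm_num : (0:Int) ≤ 255), h255]
    have h1 : 255 &&& (-a - 1).toNat = (-a - 1).toNat % 256 := by
      rw [Nat.and_comm]
      exact Nat.and_two_pow_sub_one_eq_mod (-a - 1).toNat 8
    omega

set_option maxRecDepth 4000 in
theorem pvCompl (z : Nat) (h : z < 256) : 255 - z = 255 ^^^ z := by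
  have h1 : ∀ w : Fin 256, 255 - w.val = 255 ^^^ w.val := by decide
  exact h1 ⟨z, h⟩

theorem pvXorLt (x y : Nat) (hx : x < 256) (hy : y < 256) : x ^^^ y < 256 := by
  show x ^^^ y < 2^8
  exact Nat.xor_lt_two_pow hx hy

theorem pvXorMod (x y : Nat) : (x ^^^ y) % 256 = x % 256 ^^^ y % 256 := by
  show (x ^^^ y) % 2^8 = x % 2^8 ^^^ y % 2^8
  exact Nat.xor_mod_two_pow

theorem pvN_bxor (a b : Int) : pvN (PySem.Int.bxor a b) = pvN a ^^^ pvN b := by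
  unfold pvN
  rw [PySem.Int.bxor.eq_1]
  by_cases ha : 0 ≤ a <;> by_cases hb : 0 ≤ b
  · rw [if_pos ha, if_pos hb]
    have e1 : ((((a.toNat ^^^ b.toNat : Nat)) : Int) % 256).toNat = (a.toNat ^^^ b.toNat) % 256 := by
      omega
    have e2 : (a % 256).toNat = a.toNat % 256 := by omega
    have e3 : (b % 256).toNat = b.toNat % 256 := by omega
    rw [e1, e2, e3, pvXorMod]
  · rw [if_pos ha, if_neg hb]
    have e1 : ((-(((a.toNat ^^^ (-b - 1).toNat : Nat)) : Int) - 1) % 256).toNat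
        = 255 - (a.toNat ^^^ (-b - 1).toNat) % 256 := by omega
    have e2 : (a % 256).toNat = a.toNat % 256 := by omega
    have e3 : (b % 256).toNat = 255 - (-b - 1).toNat % 256 := by omega
    rw [e1, e2, e3, pvXorMod]
    rw [pvCompl _ (pvXorLt _ _ (Nat.mod_lt _ (by norm_num)) (Nat.mod_lt _ (by norm_num)))]
    rw [pvCompl _ (Nat.mod_lt _ (by norm_num))]
    rw [← Nat.xor_assoc, ← Nat.xor_assoc, Nat.xor_comm 255 (a.toNat % 256)]
  · rw [if_neg ha, if_pos hb]
    have e1 : ((-((((-a - 1).toNat ^^^ b.toNat : Nat)) : Int) - 1) % 256).toNat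
        = 255 - ((-a - 1).toNat ^^^ b.toNat) % 256 := by omega
    have e2 : (a % 256).toNat = 255 - (-a - 1).toNat % 256 := by omega
    have e3 : (b % 256).toNat = b.toNat % 256 := by omega
    rw [e1, e2, e3, pvXorMod]
    rw [pvCompl _ (pvXorLt _ _ (Nat.mod_lt _ (by norm_num)) (Nat.mod_lt _ (by norm_num)))]
    rw [pvCompl _ (Nat.mod_lt _ (by norm_num)), Nat.xor_assoc]
  · rw [if_neg ha, if_neg hb]
    have e1 : (((((-a - 1).toNat ^^^ (-b - 1).toNat : Nat)) : Int) % 256).toNat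
        = ((-a - 1).toNat ^^^ (-b - 1).toNat) % 256 := by omega
    have e2 : (a % 256).toNat = 255 - (-a - 1).toNat % 256 := by omega
    have e3 : (b % 256).toNat = 255 - (-b - 1).toNat % 256 := by omega
    rw [e1, e2, e3, pvXorMod]
    rw [pvCompl _ (Nat.mod_lt _ (by norm_num)), pvCompl _ (Nat.mod_lt _ (by norm_num))]
    rw [← Nat.xor_assoc, Nat.xor_assoc 255 ((-a-1).toNat % 256) 255,
        Nat.xor_comm ((-a-1).toNat % 256) 255, ← Nat.xor_assoc, Nat.xor_self,
        Nat.zero_xor]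

theorem pvN_small (k : Nat) (h : k < 256) : pvN (k : Int) = k := by
  unfold pvN; omega

theorem pvN_band255 (x : Int) : pvN (PySem.Int.band x 255) = pvN x := by
  rw [band255_eq]
  exact pvN_small _ (pvN_lt x)

-- the "term" of pair j of cs when its global pair index is k
def pvCur (cs : List Char) (j k : Nat) : Int :=
  PySem.Int.bxor (pvLUT.getD (k % 54) 0)
    (PySem.Int.bor ((((cs.getD (2 * j) 'A').toNat : Int) - 65) * 16)
      (((cs.getD (2 * j + 1) 'A').toNat : Int) - 65))

theorem pvCur_cons (c1 c2 : Char) (rest : List Char) (j k : Nat) :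
    pvCur rest j k = pvCur (c1 :: c2 :: rest) (j + 1) k := by
  have h1 : (c1 :: c2 :: rest).getD (2 * (j + 1)) 'A' = rest.getD (2 * j) 'A' := by
    have e : 2 * (j + 1) = 2 * j + 1 + 1 := by omega
    rw [e, List.getD_cons_succ, List.getD_cons_succ]
  have h2 : (c1 :: c2 :: rest).getD (2 * (j + 1) + 1) 'A' = rest.getD (2 * j + 1) 'A' := by
    have e : 2 * (j + 1) + 1 = 2 * j + 1 + 1 + 1 := by omega
    rw [e, List.getD_cons_succ, List.getD_cons_succ]
  rw [pvCur, pvCur, h1, h2]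

-- B's pair loop, characterised as a map over pair indices
theorem pvPairLoop_eq : ∀ (cs : List Char) (k : Nat) (t : Int),
    pvPairLoop cs k t = (List.range (cs.length / 2)).map (fun j =>
      PySem.Int.band (PySem.Int.bxor
        (if j = 0 then t else pvCur cs (j - 1) (k + j - 1)) (pvCur cs j (k + j))) 255)
  | [], _, _ => by simp [pvPairLoop]
  | [c], _, _ => by simp [pvPairLoop]
  | c1 :: c2 :: rest, k, t => by
    show PySem.Int.band (PySem.Int.bxor t (pvCur (c1 :: c2 :: rest) 0 k)) 255
        :: pvPairLoop rest (k + 1) (pvCur (c1 :: c2 :: rest) 0 k) = _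
    rw [pvPairLoop_eq rest (k + 1) _]
    have hn : (c1 :: c2 :: rest).length / 2 = rest.length / 2 + 1 := by
      simp [List.length_cons]; omega
    rw [hn, List.range_succ_eq_map, List.map_cons, List.map_map]
    refine List.cons_eq_cons.mpr ⟨by norm_num, ?_⟩
    apply List.map_congr_left
    intro j hj
    simp only [Function.comp_apply]
    rw [if_neg (Nat.succ_ne_zero j)]
    by_cases h0 : j = 0
    · subst h0
      rw [if_pos rfl]
      congr 2
    · rw [if_neg h0]
      congr 2
      · rw [show pvCur rest (j - 1) (k + 1 + j - 1)
              = pvCur (c1 :: c2 :: rest) (j - 1 + 1) (k + 1 + j - 1) from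
            pvCur_cons c1 c2 rest (j - 1) (k + 1 + j - 1)]
        congr 1 <;> omega
      · rw [← pvCur_cons c1 c2 rest j (k + (j + 1))]
        congr 1
        omega

-- A's closed-form byte (abstracted over LUT lookup l and pair value v)
def pvG (l v : Nat → Int) (i : Nat) : Int :=
  if i = 0 then
    PySem.Int.band (PySem.Int.bxor (PySem.Int.bxor 57 (l 0)) (v 0)) 255
  else
    PySem.Int.band (PySem.Int.bxor (PySem.Int.bxor (PySem.Int.bxor
      (l (i - 1)) (v (i - 1))) (l i)) (v i)) 255

-- running XOR over the closed-form output telescopes to the previous pair alone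
theorem pvInv (l v : Nat → Int) (n : Nat) :
    pvN (((List.range n).map (pvG l v)).foldl (fun a x => PySem.Int.bxor a x) 57)
      = if n = 0 then 57 else pvN (l (n - 1)) ^^^ pvN (v (n - 1)) := by
  have h57 : pvN 57 = 57 := by decide
  induction n with
  | zero => exact h57
  | succ m ih =>
    rw [List.range_succ, List.map_append, List.foldl_append]
    simp only [List.map_cons, List.map_nil, List.foldl_cons, List.foldl_nil]
    rw [pvN_bxor, ih]
    by_cases hm : m = 0
    · subst hm
      simp only [if_true, Nat.add_one_sub_one, if_neg (Nat.one_ne_zero)]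
      rw [show pvG l v 0 = PySem.Int.band (PySem.Int.bxor (PySem.Int.bxor 57 (l 0)) (v 0)) 255 from rfl]
      rw [pvN_band255, pvN_bxor, pvN_bxor, h57,
          Nat.xor_assoc 57 (pvN (l 0)) (pvN (v 0)), Nat.xor_xor_cancel_left]
    · rw [if_neg hm, if_neg (Nat.succ_ne_zero m), Nat.add_one_sub_one]
      rw [show pvG l v m = PySem.Int.band (PySem.Int.bxor (PySem.Int.bxor (PySem.Int.bxor
            (l (m - 1)) (v (m - 1))) (l m)) (v m)) 255 from if_neg hm]
      rw [pvN_band255, pvN_bxor, pvN_bxor, pvN_bxor,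
          Nat.xor_assoc (pvN (l (m - 1)) ^^^ pvN (v (m - 1))) (pvN (l m)) (pvN (v m)),
          Nat.xor_xor_cancel_left]

-- A's accumulator loop produces exactly the closed-form list
theorem pvCore (l v : Nat → Int) (n : Nat) :
    (List.range n).foldl (fun out i =>
        out ++ [PySem.Int.band (PySem.Int.bxor (PySem.Int.bxor
          (out.foldl (fun a x => PySem.Int.bxor a x) 57) (l i)) (v i)) 255]) []
      = (List.range n).map (pvG l v) := by
  induction n with
  | zero => rfl
  | succ m ih =>
    rw [List.range_succ, List.foldl_append, List.map_append, ih]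
    simp only [List.foldl_cons, List.foldl_nil, List.map_cons, List.map_nil]
    congr 2
    by_cases hm : m = 0
    · subst hm
      simp only [List.range_zero, List.map_nil, List.foldl_nil, pvG, if_true]
    · rw [show pvG l v m = PySem.Int.band (PySem.Int.bxor (PySem.Int.bxor (PySem.Int.bxor
            (l (m - 1)) (v (m - 1))) (l m)) (v m)) 255 from if_neg hm]
      rw [band255_eq, band255_eq]
      congr 1
      rw [pvN_bxor, pvN_bxor, pvN_bxor, pvN_bxor, pvN_bxor]
      congr 1
      congr 1
      rw [pvInv l v m, if_neg hm]

-- ===== VERDICT (by name: the statement is the Claim_ definition above) =====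
theorem decode_init_string_spec : Claim_equal_decode_init_string := by
  unfold Claim_equal_decode_init_string
  intro s _
  unfold Spec_decode_init_string
  simp only [decode_init_string, decode_init_string_alt]
  generalize (PySem.Str.splitMax? s ":" 1).getD [] = parts
  generalize (parts.getD 0 "").toList = enc
  congr 1
  congr 1
  rw [pvCore (fun i => pvLUT.getD (i % 54) 0)
        (fun i => PySem.Int.bor
          ((((enc.getD (2 * i) 'A').toNat : Int) - 65) * 16)
          (((enc.getD (2 * i + 1) 'A').toNat : Int) - 65)),
      pvPairLoop_eq enc 0 57]
  congr 1
  apply List.map_congr_left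
  intro i hi
  rw [List.mem_range] at hi
  unfold pvG
  by_cases h : i = 0
  · subst h
    rw [if_pos rfl, if_pos rfl, band255_eq, band255_eq]
    refine congrArg _ ?_
    simp only [pvCur, Nat.zero_add]
    rw [pvN_bxor, pvN_bxor, pvN_bxor, pvN_bxor]
    exact Nat.xor_assoc _ _ _
  · rw [if_neg h, if_neg h, band255_eq, band255_eq]
    refine congrArg _ ?_
    have e1 : 0 + i - 1 = i - 1 := by omega
    have e2 : 0 + i = i := by omega
    simp only [pvCur, e2]
    rw [pvN_bxor, pvN_bxor, pvN_bxor, pvN_bxor, pvN_bxor, pvN_bxor]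
    exact Nat.xor_assoc _ _ _

-- end
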